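-- pv_equiv track=rewrite | github.com/pypi-data/pypi-mirror-94 | packages/radcad/radcad-0.5.0.tar.gz/radcad-0.5.0/radcad/core.py | generate_parameter_sweep
-- ===== SOURCE A (Python) =====
-- def generate_parameter_sweep(params: dict):
--     param_sweep = []
--     max_len = 0
--     for value in params.values():
--         if len(value) > max_len:
--             max_len = len(value)
--
--     for sweep_index in range(0, max_len):
--         param_set = {}
--         for (key, value) in params.items():
--             param = (
--                 value[sweep_index]
--                 if sweep_index < len(value)
--                 else value[-1]
--             )
--             param_set[key] = param
--         param_sweep.append(param_set)
--
--     return param_sweep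
-- ===== SOURCE B (Python) =====
-- def generate_parameter_sweep(params: dict):
--     # Single pass over the keys: grow the list of rows as longer value lists
--     # arrive (new rows are copies of the last row, which already holds every
--     # earlier key's padding value), then append this key's entry to each row.
--     rows = []
--     for key, value in params.items():
--         if len(value) > len(rows):
--             last = rows[-1] if rows else []
--             rows += [last[:] for _ in range(len(value) - len(rows))]
--         for row, v in zip(rows, value):
--             row.append((key, v))
--         for row in rows[len(value):]:
--             row.append((key, value[-1]))
--     return [dict(row) for row in rows]
-- ===== Notes on version B (the rewrite author's own statement) =====
-- stated objective: alternative
-- what changed: Replaces A's two-phase index-outer/key-inner nested loop (precompute max_len, then one dict per index) by a single key-outer pass that grows a list of partial rows incrementally, duplicating the last row to pad earlier keys whenever a longer value list arrives, and appending the current key's entries to every row.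
import Mathlib
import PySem

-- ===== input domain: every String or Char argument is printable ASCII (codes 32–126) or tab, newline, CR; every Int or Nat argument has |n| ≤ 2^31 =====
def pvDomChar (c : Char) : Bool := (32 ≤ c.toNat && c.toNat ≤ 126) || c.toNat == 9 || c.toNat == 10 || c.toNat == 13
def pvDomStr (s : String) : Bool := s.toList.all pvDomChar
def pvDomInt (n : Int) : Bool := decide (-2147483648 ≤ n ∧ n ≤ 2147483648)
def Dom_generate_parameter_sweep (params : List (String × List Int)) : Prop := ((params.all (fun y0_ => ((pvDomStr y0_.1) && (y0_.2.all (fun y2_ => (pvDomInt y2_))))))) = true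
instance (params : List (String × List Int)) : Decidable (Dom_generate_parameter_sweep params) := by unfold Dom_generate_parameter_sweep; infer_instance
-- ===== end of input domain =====

-- B replaces A's max_len-then-index-outer nested loop by a single key-outer pass that
-- grows a row list incrementally, padding by duplicating the last row (objective: alternative).


-- ===== PORT A =====
-- the Python expression `value[i] if i < len(value) else value[-1]`
-- (exact: pyGet? = Python indexing; the .getD 0 default is reachable only where Python
-- raises IndexError, which Pre_ excludes)
def pvPick (v : List Int) (i : Int) : Int :=
  (if i < (v.length : Int) then PySem.List.pyGet? v i else PySem.List.pyGet? v (-1)).getD 0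

def generate_parameter_sweep (params : List (String × List Int)) : List (List (String × Int)) :=
  -- param_sweep = []; max_len running-max loop
  let max_len : Int :=
    params.foldl (fun m kv => if (kv.2.length : Int) > m then (kv.2.length : Int) else m) 0
  -- for sweep_index in range(0, max_len): build param_set dict key by key, append
  (PySem.List.pyRange 0 max_len 1).foldl
    (fun sweep i =>
      sweep ++ [(params.foldl
        (fun (ps : PySem.Dict String Int) kv => ps.insert kv.1 (pvPick kv.2 i))
        PySem.Dict.empty).items])
    []

-- ===== PORT B =====
-- one iteration of Source B's key loop: extend `rows` with copies of the last row
-- (`rows[-1] if rows else []` = getLastD []), then append (key, value[i]) to the first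
-- len(value) rows (the zip loop) and (key, value[-1]) to the rest (`rows[len(value):]`
-- with a non-negative bound = drop; pyGet? (-1) = value[-1], .getD 0 reachable only
-- where Python raises IndexError, excluded by Pre_)
def pvStep (rows : List (List (String × Int))) (kv : String × List Int) :
    List (List (String × Int)) :=
  let value := kv.2
  let rows1 :=
    if value.length > rows.length then
      rows ++ List.replicate (value.length - rows.length) (rows.getLastD [])
    else rows
  ((rows1.zip value).map (fun p => p.1 ++ [(kv.1, p.2)])) ++
    ((rows1.drop value.length).map
      (fun row => row ++ [(kv.1, (PySem.List.pyGet? value (-1)).getD 0)]))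

def generate_parameter_sweep_alt (params : List (String × List Int)) :
    List (List (String × Int)) :=
  (params.foldl pvStep []).map (fun row => (PySem.Dict.ofList row).items)

-- ===== PRECONDITION & SPEC =====
-- Pre_ excludes (a) params with duplicate keys, which no Python dict input can carry (the
-- assoc list has no dict counterpart there), and (b) params mixing empty and non-empty
-- value lists, on which A raises IndexError via value[-1].
def Pre_generate_parameter_sweep (params : List (String × List Int)) : Prop :=
  (params.map Prod.fst).Nodup ∧
  (params.all (fun kv => kv.2 ≠ []) ∨ params.all (fun kv => kv.2 = []))
instance (params : List (String × List Int)) : Decidable (Pre_generate_parameter_sweep params) := by unfold Pre_generate_parameter_sweep; infer_instance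

def pvWitness_generate_parameter_sweep : (List (String × List Int)) :=
  [("a", [1]), ("b", [4, 5, 6])]

def Spec_generate_parameter_sweep (params : List (String × List Int)) (out : List (List (String × Int))) : Prop := out = generate_parameter_sweep_alt params
instance (params : List (String × List Int)) (out : List (List (String × Int))) : Decidable (Spec_generate_parameter_sweep params out) := by unfold Spec_generate_parameter_sweep; infer_instance

-- ===== CLAIM =====
def Claim_equal_generate_parameter_sweep : Prop := ∀ (params : List (String × List Int)), Dom_generate_parameter_sweep params → Pre_generate_parameter_sweep params → Spec_generate_parameter_sweep params (generate_parameter_sweep params)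

-- ===== LEMMAS AND PROOFS =====

-- the common row shape both programs produce for sweep index i
def pvRow (ps : List (String × List Int)) (i : Nat) : List (String × Int) :=
  ps.map (fun kv => (kv.1, pvPick kv.2 (i : Int)))

-- the Nat form of the maximum value-list length
def pvMaxN (ps : List (String × List Int)) : Nat :=
  ps.foldl (fun m kv => max m kv.2.length) 0

theorem pv_afold (ps : List (String × List Int)) : ∀ (a : Nat),
    ps.foldl (fun m kv => if (kv.2.length : Int) > m then (kv.2.length : Int) else m) (a : Int)
      = ((ps.foldl (fun m kv => max m kv.2.length) a : Nat) : Int) := by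
  induction ps with
  | nil => intro a; rfl
  | cons kv t ih =>
    intro a
    simp only [List.foldl_cons]
    have h : (if (kv.2.length : Int) > (a : Int) then (kv.2.length : Int) else (a : Int))
        = ((max a kv.2.length : Nat) : Int) := by
      split_ifs with h <;> push_cast <;> omega
    rw [h, ih]

theorem pv_foldl_max_le (l : List (String × List Int)) : ∀ (a : Nat),
    a ≤ l.foldl (fun m kv => max m kv.2.length) a ∧
    ∀ kv ∈ l, kv.2.length ≤ l.foldl (fun m kv => max m kv.2.length) a := by
  induction l with
  | nil => intro a; exact ⟨le_refl a, by simp⟩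
  | cons p t ih =>
    intro a
    obtain ⟨h1, h2⟩ := ih (max a p.2.length)
    refine ⟨le_trans (le_max_left _ _) h1, ?_⟩
    intro kv hkv
    rcases List.mem_cons.mp hkv with rfl | h
    · exact le_trans (le_max_right _ _) h1
    · exact h2 kv h

theorem pv_pick_lt (v : List Int) (i : Nat) (h : i < v.length) :
    pvPick v (i : Int) = v[i] := by
  have hc : ((i : Int)) < (v.length : Int) := by exact_mod_cast h
  simp [pvPick, hc, List.getElem?_eq_getElem h]

theorem pv_pick_ge (v : List Int) (i : Nat) (h : v.length ≤ i) :
    pvPick v (i : Int) = (PySem.List.pyGet? v (-1)).getD 0 := by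
  have hc : ¬ ((i : Int) < (v.length : Int)) := by exact_mod_cast Nat.not_lt.mpr h
  simp [pvPick, hc]

theorem pv_pick_last (v : List Int) (hv : v ≠ []) (i : Nat) (h : v.length - 1 ≤ i) :
    pvPick v (i : Int) = (PySem.List.pyGet? v (-1)).getD 0 := by
  by_cases hge : v.length ≤ i
  · exact pv_pick_ge v i hge
  · have hlen : 0 < v.length := List.length_pos_iff.mpr hv
    have hi : i = v.length - 1 := by omega
    have hlt : i < v.length := by omega
    rw [pv_pick_lt v i hlt, PySem.List.pyGet?_neg_one,
      List.getLast?_eq_getElem?, List.getElem?_eq_getElem (by omega : v.length - 1 < v.length)]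
    simp [hi]

-- rows are constant from index pvMaxN ps - 1 on (all value lists non-empty)
theorem pv_row_const (ps : List (String × List Int)) (hne : ∀ kv ∈ ps, kv.2 ≠ [])
    (i j : Nat) (hi : pvMaxN ps - 1 ≤ i) (hj : pvMaxN ps - 1 ≤ j) :
    pvRow ps i = pvRow ps j := by
  unfold pvRow
  apply List.map_congr_left
  intro kv hkv
  have hlen := (pv_foldl_max_le ps 0).2 kv hkv
  have h1 := pv_pick_last kv.2 (hne kv hkv) i (by unfold pvMaxN at hi; omega)
  have h2 := pv_pick_last kv.2 (hne kv hkv) j (by unfold pvMaxN at hj; omega)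
  rw [h1, h2]

-- dict(row) over distinct keys is the pair list itself
theorem pv_ofList_items (prs : List (String × Int)) (h : (prs.map Prod.fst).Nodup) :
    (PySem.Dict.ofList prs).items = prs := by
  have heq : PySem.Dict.ofList prs
      = prs.foldl (fun (d : PySem.Dict String Int) p => d.insert p.1 p.2) PySem.Dict.empty := rfl
  rw [heq]
  have := PySem.Dict.items_foldl_insert_fresh prs Prod.fst Prod.snd PySem.Dict.empty
    (by intro a _; simp [PySem.Dict.contains_empty]) h
  simpa using this

-- A's inner key loop over distinct keys produces the items list directly
theorem pv_row_items (params : List (String × List Int)) (i : Int)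
    (h : (params.map Prod.fst).Nodup) :
    (params.foldl (fun (ps : PySem.Dict String Int) kv => ps.insert kv.1 (pvPick kv.2 i))
        PySem.Dict.empty).items
      = params.map (fun kv => (kv.1, pvPick kv.2 i)) := by
  have := PySem.Dict.items_foldl_insert_fresh params Prod.fst (fun kv => pvPick kv.2 i)
    PySem.Dict.empty (by intro a _; simp [PySem.Dict.contains_empty]) h
  simpa using this

-- A computes the table of rows directly
theorem pv_afold0 (ps : List (String × List Int)) :
    ps.foldl (fun m kv => if (kv.2.length : Int) > m then (kv.2.length : Int) else m) 0
      = ((pvMaxN ps : Nat) : Int) := by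
  have := pv_afold ps 0
  simpa [pvMaxN] using this

theorem pv_A_eq (params : List (String × List Int)) (h : (params.map Prod.fst).Nodup) :
    generate_parameter_sweep params = (List.range (pvMaxN params)).map (pvRow params) := by
  unfold generate_parameter_sweep
  rw [pv_afold0 params, PySem.List.foldl_append_singleton_eq_map, List.nil_append,
    PySem.List.pyRange_one 0 ((pvMaxN params : Nat) : Int)]
  simp only [List.map_map, Function.comp_def, Int.sub_zero, Int.toNat_natCast, zero_add]
  apply List.map_congr_left
  intro k _
  rw [pv_row_items params (k : Int) h]
  rfl

-- the last row of the table pads every index from pvMaxN ps on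
theorem pv_pad (ps : List (String × List Int)) (hne : ∀ p ∈ ps, p.2 ≠ [])
    (i : Nat) (hi : pvMaxN ps ≤ i) :
    pvRow ps i = ((List.range (pvMaxN ps)).map (pvRow ps)).getLastD [] := by
  by_cases hm0 : pvMaxN ps = 0
  · rw [hm0]
    simp only [List.range_zero, List.map_nil, List.getLastD_nil]
    have hnil : ps = [] := by
      cases hps : ps with
      | nil => rfl
      | cons p t =>
        exfalso
        have hple : p.2.length ≤ pvMaxN ps :=
          (pv_foldl_max_le ps 0).2 p (by rw [hps]; exact List.mem_cons_self)
        have hp := hne p (by rw [hps]; exact List.mem_cons_self)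
        exact hp (List.length_eq_zero_iff.mp (by omega))
    simp [pvRow, hnil]
  · have hmpos : 0 < pvMaxN ps := Nat.pos_of_ne_zero hm0
    have hlastD : ((List.range (pvMaxN ps)).map (pvRow ps)).getLastD []
        = pvRow ps (pvMaxN ps - 1) := by
      rw [List.getLastD_eq_getLast?, List.getLast?_eq_getElem?,
        List.getElem?_eq_getElem (by simp; omega :
          ((List.range (pvMaxN ps)).map (pvRow ps)).length - 1
            < ((List.range (pvMaxN ps)).map (pvRow ps)).length)]
      simp [List.getElem_map, List.getElem_range]
    rw [hlastD]
    exact pv_row_const ps hne i (pvMaxN ps - 1) (by omega) (by omega)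

-- one pvStep on a well-formed row table extends every row by the current key
theorem pv_step_eq (ps : List (String × List Int)) (kv : String × List Int)
    (hne : ∀ p ∈ ps, p.2 ≠ []) :
    pvStep ((List.range (pvMaxN ps)).map (pvRow ps)) kv
      = (List.range (pvMaxN (ps ++ [kv]))).map (pvRow (ps ++ [kv])) := by
  have hM : pvMaxN (ps ++ [kv]) = max (pvMaxN ps) kv.2.length := by
    unfold pvMaxN; rw [List.foldl_append]; rfl
  have hrow' : ∀ i : Nat,
      pvRow (ps ++ [kv]) i = pvRow ps i ++ [(kv.1, pvPick kv.2 (i : Int))] := by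
    intro i; unfold pvRow; simp
  have hrows1 : (if kv.2.length > ((List.range (pvMaxN ps)).map (pvRow ps)).length then
        ((List.range (pvMaxN ps)).map (pvRow ps)) ++
          List.replicate (kv.2.length - ((List.range (pvMaxN ps)).map (pvRow ps)).length)
            (((List.range (pvMaxN ps)).map (pvRow ps)).getLastD [])
      else ((List.range (pvMaxN ps)).map (pvRow ps)))
      = (List.range (max (pvMaxN ps) kv.2.length)).map (pvRow ps) := by
    simp only [List.length_map, List.length_range]
    by_cases hcase : kv.2.length > pvMaxN ps
    · rw [if_pos hcase]
      apply List.ext_getElem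
      · simp; omega
      · intro i h1 h2
        simp only [List.length_map, List.length_range] at h2
        by_cases hil : i < pvMaxN ps
        · rw [List.getElem_append_left (by simp; omega)]
          simp [List.getElem_map, List.getElem_range]
        · rw [List.getElem_append_right (by simp; omega)]
          simp only [List.getElem_replicate, List.getElem_map, List.getElem_range]
          exact (pv_pad ps hne i (by omega)).symm
    · rw [if_neg hcase]
      have hmx : max (pvMaxN ps) kv.2.length = pvMaxN ps := by omega
      rw [hmx]
  unfold pvStep
  simp only [hrows1, hM]
  apply List.ext_getElem
  · simp only [List.length_append, List.length_map, List.length_zip, List.length_range,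
      List.length_drop]
    omega
  · intro i h1 h2
    simp only [List.length_map, List.length_range] at h2
    simp only [List.getElem_map, List.getElem_range] at *
    rw [hrow' i]
    by_cases hil : i < kv.2.length
    · have hlt : i < (List.map
          (fun p : List (String × Int) × Int => p.1 ++ [(kv.1, p.2)])
          (((List.range (max (pvMaxN ps) kv.2.length)).map (pvRow ps)).zip kv.2)).length := by
        simp only [List.length_map, List.length_zip, List.length_range]; omega
      rw [List.getElem_append_left hlt]
      simp only [List.getElem_map, List.getElem_zip, List.getElem_range]
      rw [pv_pick_lt kv.2 i (by omega)]
    · have hge : (List.map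
          (fun p : List (String × Int) × Int => p.1 ++ [(kv.1, p.2)])
          (((List.range (max (pvMaxN ps) kv.2.length)).map (pvRow ps)).zip kv.2)).length ≤ i := by
        simp only [List.length_map, List.length_zip, List.length_range]; omega
      rw [List.getElem_append_right hge]
      simp only [List.length_map, List.length_zip, List.length_range, List.getElem_map,
        List.getElem_drop, List.getElem_range]
      rw [pv_pick_ge kv.2 i (by omega)]
      congr 3
      omega

-- B's key loop builds the same table of rows (all value lists non-empty)
theorem pv_B_inv (ps : List (String × List Int)) (hne : ∀ p ∈ ps, p.2 ≠ []) :
    ps.foldl pvStep [] = (List.range (pvMaxN ps)).map (pvRow ps) := by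
  induction ps using List.reverseRecOn with
  | nil => rfl
  | append_singleton t kv ih =>
    have hnet : ∀ p ∈ t, p.2 ≠ [] := fun p hp => hne p (List.mem_append_left _ hp)
    rw [List.foldl_append, List.foldl_cons, List.foldl_nil, ih hnet]
    exact pv_step_eq t kv hnet

-- B's key loop on all-empty value lists never creates a row
theorem pv_B_empty (ps : List (String × List Int)) (hall : ∀ p ∈ ps, p.2 = []) :
    ps.foldl pvStep [] = [] := by
  induction ps with
  | nil => rfl
  | cons p t ih =>
    rw [List.foldl_cons]
    have hp : p.2 = [] := hall p List.mem_cons_self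
    have hstep : pvStep [] p = [] := by simp [pvStep, hp]
    rw [hstep]
    exact ih (fun q hq => hall q (List.mem_cons_of_mem _ hq))

-- A on all-empty value lists returns []
theorem pv_A_empty (ps : List (String × List Int)) (hall : ∀ p ∈ ps, p.2 = []) :
    pvMaxN ps = 0 := by
  induction ps with
  | nil => rfl
  | cons p t ih =>
    have hp : p.2 = [] := hall p List.mem_cons_self
    unfold pvMaxN
    simp only [List.foldl_cons, hp, List.length_nil, Nat.max_zero]
    exact ih (fun q hq => hall q (List.mem_cons_of_mem _ hq))

-- ===== VERDICT =====
theorem generate_parameter_sweep_spec : Claim_equal_generate_parameter_sweep := by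
  intro params _ hpre
  obtain ⟨hnodup, hval⟩ := hpre
  unfold Spec_generate_parameter_sweep generate_parameter_sweep_alt
  rw [pv_A_eq params hnodup]
  rcases hval with hne | hemp
  · have hne' : ∀ p ∈ params, p.2 ≠ [] := by
      intro p hp; exact of_decide_eq_true (List.all_eq_true.mp hne p hp)
    rw [pv_B_inv params hne', List.map_map]
    symm
    apply List.map_congr_left
    intro i _
    simp only [Function.comp_apply]
    refine pv_ofList_items _ ?_
    have : (pvRow params i).map Prod.fst = params.map Prod.fst := by
      unfold pvRow; rw [List.map_map]; rfl
    rw [this]; exact hnodup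
  · have hemp' : ∀ p ∈ params, p.2 = [] := by
      intro p hp; exact of_decide_eq_true (List.all_eq_true.mp hemp p hp)
    rw [pv_B_empty params hemp', pv_A_empty params hemp']
    rfl
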